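-- pv_equiv track=rewrite | github.com/Haivision/srt | scripts/changelog_generator/changelog.py | delete_prefix
-- ===== SOURCE A (Python) =====
-- def delete_prefix(msg):
--     prefixes = [
--         '[core] ',
--         '[API] ',
--         '[build] ',
--         '[tests] ',
--         '[apps] ',
--         '[docs] ',
--     ]
--
--     for prefix in prefixes:
--         if msg.startswith(prefix):
--             return msg[len(prefix):]
--
--     return msg[:]
-- ===== SOURCE B (Python) =====
-- _KNOWN = {
--     '[core] ',
--     '[API] ',
--     '[build] ',
--     '[tests] ',
--     '[apps] ',
--     '[docs] ',
-- }
--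
--
-- def delete_prefix(msg):
--     if msg.startswith('['):
--         idx = msg.find('] ')
--         if idx != -1 and msg[:idx + 2] in _KNOWN:
--             return msg[idx + 2:]
--     return msg
-- ===== Notes on version B (the rewrite author's own statement) =====
-- stated objective: idiomatic
-- what changed: Replaces A's probe-each-of-six-prefixes loop with a single tag extraction (find the first '] ') followed by one set-membership test of the extracted tag.
import Mathlib
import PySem

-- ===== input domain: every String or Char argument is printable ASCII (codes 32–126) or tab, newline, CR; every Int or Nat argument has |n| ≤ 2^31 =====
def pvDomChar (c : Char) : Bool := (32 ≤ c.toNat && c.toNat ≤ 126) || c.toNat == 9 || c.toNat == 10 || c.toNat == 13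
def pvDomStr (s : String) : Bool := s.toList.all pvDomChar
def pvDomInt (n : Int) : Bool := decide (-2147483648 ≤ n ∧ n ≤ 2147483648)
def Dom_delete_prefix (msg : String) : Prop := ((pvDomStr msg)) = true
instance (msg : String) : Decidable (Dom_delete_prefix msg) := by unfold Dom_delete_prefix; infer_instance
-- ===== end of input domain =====

-- B replaces A's probe-each-of-six-prefixes loop with one '] ' tag extraction plus a single
-- set-membership test (idiomatic; same asymptotic cost).

-- ===== PORT A =====
-- the for-loop over the prefix list: return on the first match, else msg[:]
def dpLoop (msg : String) : List String → String
  | [] => PySem.Str.slice msg none none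
  | p :: rest =>
      if PySem.Str.startswith msg p then PySem.Str.slice msg (some (PySem.Str.len p)) none
      else dpLoop msg rest

def delete_prefix (msg : String) : String :=
  dpLoop msg ["[core] ", "[API] ", "[build] ", "[tests] ", "[apps] ", "[docs] "]

-- ===== PORT B =====
def dpKnown : PySem.Set String :=
  PySem.Set.ofList ["[core] ", "[API] ", "[build] ", "[tests] ", "[apps] ", "[docs] "]

def delete_prefix_alt (msg : String) : String :=
  if PySem.Str.startswith msg "[" then
    let idx := PySem.Str.find msg "] "
    if idx ≠ -1 ∧ PySem.Set.contains dpKnown (PySem.Str.slice msg none (some (idx + 2))) = true then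
      PySem.Str.slice msg (some (idx + 2)) none
    else msg
  else msg

-- ===== PRECONDITION & SPEC =====
def Spec_delete_prefix (msg : String) (out : String) : Prop := out = delete_prefix_alt msg
instance (msg : String) (out : String) : Decidable (Spec_delete_prefix msg out) := by unfold Spec_delete_prefix; infer_instance

-- ===== CLAIM (what is proved, stated in full; the proofs are below) =====
def Claim_equal_delete_prefix : Prop := ∀ (msg : String), Dom_delete_prefix msg → Spec_delete_prefix msg (delete_prefix msg)

-- ===== LEMMAS AND PROOFS =====

-- the first occurrence of "] " in q ++ "] " ++ rest is at index q.length when ']' does not occur in q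
lemma findPrefix (q rest : List Char) (hq : ∀ c ∈ q, c ≠ ']') :
    PySem.Chars.find (q ++ [']', ' '] ++ rest) [']', ' '] = (q.length : Int) := by
  set L := q ++ [']', ' '] ++ rest with hL
  have hdrop : [']', ' '] <+: L.drop q.length := by
    rw [hL, List.append_assoc, List.drop_left]
    exact ⟨rest, rfl⟩
  have hnot : ∀ i, i < q.length → ¬ [']', ' '] <+: L.drop i := by
    intro i hi hpre
    obtain ⟨t, ht⟩ := hpre
    have h0 : (L.drop i)[0]? = some ']' := by rw [← ht]; rfl
    rw [List.getElem?_drop] at h0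
    have hqi : L[i + 0]? = q[i]? := by
      rw [hL, List.append_assoc, List.getElem?_append_left (by omega : i + 0 < q.length)]
      norm_num
    rw [hqi, List.getElem?_eq_getElem hi] at h0
    exact hq _ (List.getElem_mem hi) (by simpa using h0)
  have hinf : [']', ' '] <:+: L := hdrop.isInfix.trans (List.drop_suffix _ _).isInfix
  have hge : 0 ≤ PySem.Chars.find L [']', ' '] := (PySem.Chars.find_nonneg_iff _ _).2 hinf
  obtain ⟨h1, h2⟩ := PySem.Chars.find_spec hge
  have htn : (PySem.Chars.find L [']', ' ']).toNat = q.length := by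
    rcases Nat.lt_trichotomy (PySem.Chars.find L [']', ' ']).toNat q.length with h | h | h
    · exact absurd h1 (hnot _ h)
    · exact h
    · exact absurd hdrop (h2 _ h)
  omega

-- if msg starts with a known bracketed prefix p = '[' ++ qt ++ '] ', B strips exactly p
lemma alt_of_match (msg p : String) (qt : List Char)
    (hp : p.toList = '[' :: (qt ++ [']', ' ']))
    (hqt : ∀ c ∈ qt, c ≠ ']')
    (hmem : PySem.Set.contains dpKnown p = true)
    (h : PySem.Str.startswith msg p = true) :
    delete_prefix_alt msg = PySem.Str.slice msg (some (PySem.Str.len p)) none := by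
  rw [PySem.Str.startswith_eq, PySem.Chars.startswith_iff] at h
  obtain ⟨rest, hrest⟩ := h
  have hLeq : msg.toList = ('[' :: qt) ++ [']', ' '] ++ rest := by
    rw [← hrest, hp]; simp
  have hq : ∀ c ∈ ('[' :: qt), c ≠ ']' := by
    intro c hc
    rcases List.mem_cons.1 hc with rfl | hc
    · simp
    · exact hqt _ hc
  have hfind : PySem.Str.find msg "] " = (((qt.length + 1 : Nat)) : Int) := by
    rw [PySem.Str.find_eq, show ("] ").toList = [']', ' '] from rfl, hLeq]
    simpa using findPrefix ('[' :: qt) rest hq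
  have hlen : PySem.Str.len p = ((qt.length + 3 : Nat) : Int) := by
    rw [PySem.Str.len_eq, hp]; push_cast; simp; omega
  have hstart : PySem.Str.startswith msg "[" = true := by
    rw [PySem.Str.startswith_eq, PySem.Chars.startswith_iff,
        show ("[").toList = ['['] from rfl, hLeq]
    exact ⟨qt ++ [']', ' '] ++ rest, by simp⟩
  have hcand : PySem.Str.slice msg none (some (PySem.Str.find msg "] " + 2)) = p := by
    rw [← String.toList_inj, PySem.Str.toList_slice, PySem.Chars.slice_eq_listSlice, hfind]
    have h32 : ((qt.length + 1 : Nat) : Int) + 2 = ((qt.length + 3 : Nat) : Int) := by push_cast; ring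
    rw [h32, PySem.List.slice_to_natCast, hLeq, hp]
    have hl3 : (('[' :: qt) ++ [']', ' ']).length = qt.length + 3 := by
      simp only [List.length_append, List.length_cons, List.length_nil]
    rw [List.take_left' hl3, List.cons_append]
  unfold delete_prefix_alt
  rw [if_pos hstart]
  simp only []
  rw [if_pos ⟨by rw [hfind]; omega, by rw [hcand]; exact hmem⟩]
  have h32 : ((qt.length + 1 : Nat) : Int) + 2 = ((qt.length + 3 : Nat) : Int) := by push_cast; ring
  rw [hfind, h32, hlen]

-- if no known prefix matches, B returns msg unchanged
lemma alt_of_no_match (msg : String)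
    (h : ∀ p ∈ ["[core] ", "[API] ", "[build] ", "[tests] ", "[apps] ", "[docs] "],
        PySem.Str.startswith msg p = false) :
    delete_prefix_alt msg = msg := by
  unfold delete_prefix_alt
  by_cases h1 : PySem.Str.startswith msg "[" = true
  case neg => rw [if_neg h1]
  rw [if_pos h1]
  show (if PySem.Str.find msg "] " ≠ -1 ∧ PySem.Set.contains dpKnown
      (PySem.Str.slice msg none (some (PySem.Str.find msg "] " + 2))) = true then
      PySem.Str.slice msg (some (PySem.Str.find msg "] " + 2)) none else msg) = msg
  by_cases h2 : PySem.Str.find msg "] " ≠ -1 ∧ PySem.Set.contains dpKnown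
      (PySem.Str.slice msg none (some (PySem.Str.find msg "] " + 2))) = true
  case neg => rw [if_neg h2]
  · exfalso
    obtain ⟨hne, hc⟩ := h2
    -- the accepted candidate is a take-prefix of msg and a member of the known set
    have hmem : PySem.Str.slice msg none (some (PySem.Str.find msg "] " + 2)) ∈
        ["[core] ", "[API] ", "[build] ", "[tests] ", "[apps] ", "[docs] "] := by
      have := hc
      simp only [dpKnown, PySem.Set.contains] at this
      rw [← PySem.Set.mem_ofList]
      exact (List.contains_iff_mem).1 this
    set c := PySem.Str.slice msg none (some (PySem.Str.find msg "] " + 2)) with hc'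
    have hpre : c.toList <+: msg.toList := by
      have hge : 0 ≤ PySem.Str.find msg "] " := by
        have := PySem.Chars.neg_one_le_find msg.toList ("] ").toList
        rw [PySem.Str.find_eq] at hne ⊢
        omega
      rw [hc', PySem.Str.toList_slice, PySem.Chars.slice_eq_listSlice,
          PySem.List.slice_to msg.toList (by omega)]
      exact List.take_prefix _ _
    have hsw : PySem.Str.startswith msg c = true := by
      rw [PySem.Str.startswith_eq, PySem.Chars.startswith_iff]
      exact hpre
    have := h c hmem
    rw [hsw] at this
    exact Bool.noConfusion this

-- msg[:] is msg
lemma slice_none_none_str (msg : String) : PySem.Str.slice msg none none = msg := by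
  rw [← String.toList_inj, PySem.Str.toList_slice, PySem.Chars.slice_eq_listSlice]
  simp

-- ===== VERDICT (by name: the statement is the Claim_ definition above) =====
theorem delete_prefix_spec : Claim_equal_delete_prefix := by
  intro msg _
  unfold Spec_delete_prefix delete_prefix
  simp only [dpLoop]
  split_ifs with h1 h2 h3 h4 h5 h6
  · exact (alt_of_match msg "[core] " ['c','o','r','e'] rfl (by simp) (by simp [dpKnown, PySem.Set.contains, PySem.Set.ofList, PySem.Set.add]) h1).symm
  · exact (alt_of_match msg "[API] " ['A','P','I'] rfl (by simp) (by simp [dpKnown, PySem.Set.contains, PySem.Set.ofList, PySem.Set.add]) h2).symm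
  · exact (alt_of_match msg "[build] " ['b','u','i','l','d'] rfl (by simp) (by simp [dpKnown, PySem.Set.contains, PySem.Set.ofList, PySem.Set.add]) h3).symm
  · exact (alt_of_match msg "[tests] " ['t','e','s','t','s'] rfl (by simp) (by simp [dpKnown, PySem.Set.contains, PySem.Set.ofList, PySem.Set.add]) h4).symm
  · exact (alt_of_match msg "[apps] " ['a','p','p','s'] rfl (by simp) (by simp [dpKnown, PySem.Set.contains, PySem.Set.ofList, PySem.Set.add]) h5).symm
  · exact (alt_of_match msg "[docs] " ['d','o','c','s'] rfl (by simp) (by simp [dpKnown, PySem.Set.contains, PySem.Set.ofList, PySem.Set.add]) h6).symm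
  · rw [slice_none_none_str, alt_of_no_match msg ?_]
    intro p hp
    fin_cases hp <;> simp_all
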